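-- pv_equiv track=rewrite | github.com/JakeyKakey/jak30_mmp | bin/main.py | count_individual_gaps
-- ===== SOURCE A (Python) =====
-- def count_individual_gaps(sequence):
--     last = ""
--     index = 0
--     gaps = []
--     start = []
--     for letter in sequence:
--         index += 1
--         if letter == "-":
--             if last != "-":
--                 gaps.append(1)
--                 start.append(index)
--             else:
--                 gaps[-1] += 1
--         last = letter
--
--     return gaps, start
-- ===== SOURCE B (Python) =====
-- def count_individual_gaps(sequence):
--     seq = list(sequence)
--     n = len(seq)
--     # phase 1: split into maximal runs of (is_gap, length)
--     runs = []
--     i = 0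
--     while i < n:
--         b = seq[i] == "-"
--         j = i + 1
--         while j < n and (seq[j] == "-") == b:
--             j += 1
--         runs.append((b, j - i))
--         i = j
--     # phase 2: fold over runs
--     index = 0
--     gaps = []
--     start = []
--     for b, length in runs:
--         if b:
--             gaps.append(length)
--             start.append(index + 1)
--         index += length
--     return gaps, start
-- ===== Notes on version B (the rewrite author's own statement) =====
-- stated objective: alternative
-- what changed: Replaces the element-by-element `last`-state machine (with in-place gaps[-1] += 1 updates) by a two-phase run-grouping traversal: first split the sequence into maximal runs of gap/non-gap, then fold over the runs, emitting each gap run's length and start position once.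
import Mathlib
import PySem

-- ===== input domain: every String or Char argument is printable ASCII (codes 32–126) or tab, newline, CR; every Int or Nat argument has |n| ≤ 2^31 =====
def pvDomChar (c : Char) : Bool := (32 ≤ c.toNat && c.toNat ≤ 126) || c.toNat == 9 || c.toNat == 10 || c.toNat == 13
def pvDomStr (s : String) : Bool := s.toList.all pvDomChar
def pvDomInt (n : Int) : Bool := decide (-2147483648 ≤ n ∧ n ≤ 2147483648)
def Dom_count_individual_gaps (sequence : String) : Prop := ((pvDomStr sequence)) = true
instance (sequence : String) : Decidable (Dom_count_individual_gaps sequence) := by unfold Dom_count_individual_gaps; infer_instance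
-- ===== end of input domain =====

-- B replaces A's element-by-element `last`-state machine by a two-phase run-grouping
-- traversal (split into maximal runs, then fold over the runs); same O(n) cost, alternative structure.

-- ===== PORT A =====
-- One iteration of A's for-loop; state = (last, index, gaps, start).
-- gaps[-1] += 1 is ported as dropLast ++ [getLastD 0 + 1]; exact whenever gaps ≠ [],
-- which is the only situation Python reaches that branch in (last = "-" implies a gap was appended).
def cigStepA (st : String × Int × List Int × List Int) (letter : Char) :
    String × Int × List Int × List Int :=
  let last := st.1
  let index := st.2.1 + 1
  let gaps := st.2.2.1
  let start := st.2.2.2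
  if letter == '-' then
    if last ≠ "-" then
      (String.singleton letter, index, gaps ++ [1], start ++ [index])
    else
      (String.singleton letter, index, gaps.dropLast ++ [gaps.getLastD 0 + 1], start)
  else
    (String.singleton letter, index, gaps, start)

def count_individual_gaps (sequence : String) : List Int × List Int :=
  let st := sequence.toList.foldl cigStepA ("", 0, [], [])
  (st.2.2.1, st.2.2.2)

-- ===== PORT B =====
-- Phase 1 of Source B: split the character list into maximal runs keyed by (c == '-'),
-- returning (is_gap, run length) for each run.
def cigRuns : List Char → List (Bool × Nat)
  | [] => []
  | c :: cs =>
    ((c == '-'), (cs.takeWhile (fun d => (d == '-') == (c == '-'))).length + 1)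
      :: cigRuns (cs.dropWhile (fun d => (d == '-') == (c == '-')))
termination_by l => l.length
decreasing_by
  simpa using Nat.lt_succ_of_le (List.length_dropWhile_le _ _)

-- Phase 2 of Source B: fold over the runs; state = (index, gaps, start).
def cigStepB (st : Int × List Int × List Int) (r : Bool × Nat) :
    Int × List Int × List Int :=
  let index := st.1
  let gaps := st.2.1
  let start := st.2.2
  if r.1 then (index + (r.2 : Int), gaps ++ [(r.2 : Int)], start ++ [index + 1])
  else (index + (r.2 : Int), gaps, start)

def count_individual_gaps_alt (sequence : String) : List Int × List Int :=
  let st := (cigRuns sequence.toList).foldl cigStepB (0, [], [])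
  (st.2.1, st.2.2)

-- ===== PRECONDITION & SPEC =====
def Spec_count_individual_gaps (sequence : String) (out : List Int × List Int) : Prop := out = count_individual_gaps_alt sequence
instance (sequence : String) (out : List Int × List Int) : Decidable (Spec_count_individual_gaps sequence out) := by unfold Spec_count_individual_gaps; infer_instance

-- ===== CLAIM (what is proved, stated in full; the proofs are below) =====
def Claim_equal_count_individual_gaps : Prop := ∀ (sequence : String), Dom_count_individual_gaps sequence → Spec_count_individual_gaps sequence (count_individual_gaps sequence)

-- ===== LEMMAS AND PROOFS =====

-- Continuing a gap run: every remaining letter is '-', last is already "-".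
theorem cig_gap_cont (l : List Char) (hl : ∀ c ∈ l, c = '-') (index g : Int)
    (gaps start : List Int) :
    l.foldl cigStepA ("-", index, gaps ++ [g], start)
      = ("-", index + l.length, gaps ++ [g + l.length], start) := by
  induction l generalizing index g with
  | nil => simp
  | cons c cs ih =>
    have hc : c = '-' := hl c (by simp)
    have hcs : ∀ d ∈ cs, d = '-' := fun d hd => hl d (by simp [hd])
    subst hc
    have hstep : cigStepA ("-", index, gaps ++ [g], start) '-'
        = ("-", index + 1, gaps ++ [g + 1], start) := by
      simp only [cigStepA, beq_self_eq_true, if_true, ne_eq, not_true_eq_false, if_false,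
        List.dropLast_concat, List.getLastD_concat]
      rw [show String.singleton '-' = "-" by decide]
    rw [List.foldl_cons, hstep, ih hcs]
    have h1 : index + 1 + (cs.length : Int) = index + (('-' :: cs).length : Int) := by
      push_cast [List.length_cons]; ring
    have h2 : g + 1 + (cs.length : Int) = g + (('-' :: cs).length : Int) := by
      push_cast [List.length_cons]; ring
    rw [h1, h2]

-- Crossing a non-gap run: no letter is '-'; gaps/start unchanged, last ends non-"-".
theorem cig_nongap_cont (l : List Char) (hl : ∀ c ∈ l, c ≠ '-') (last : String)
    (hlast : last ≠ "-") (index : Int) (gaps start : List Int) :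
    ∃ last', last' ≠ "-" ∧
      l.foldl cigStepA (last, index, gaps, start) = (last', index + l.length, gaps, start) := by
  induction l generalizing last index with
  | nil => exact ⟨last, hlast, by simp⟩
  | cons c cs ih =>
    have hc : c ≠ '-' := hl c (by simp)
    have hcs : ∀ d ∈ cs, d ≠ '-' := fun d hd => hl d (by simp [hd])
    have hsing : String.singleton c ≠ "-" := by
      intro h
      exact hc (by simpa using congrArg String.toList h)
    have hbeq : (c == '-') = false := by simpa using hc
    obtain ⟨last', h1, h2⟩ := ih hcs (String.singleton c) hsing (index + 1)
    refine ⟨last', h1, ?_⟩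
    have hstep : cigStepA (last, index, gaps, start) c
        = (String.singleton c, index + 1, gaps, start) := by
      simp [cigStepA, hbeq]
    rw [List.foldl_cons, hstep, h2]
    have hl1 : index + 1 + (cs.length : Int) = index + ((c :: cs).length : Int) := by
      push_cast [List.length_cons]; ring
    rw [hl1]

-- Main invariant: A's fold (projected past `last`) equals B's fold over the runs,
-- provided that whenever last = "-" the next letter is not '-' (a fresh run boundary).
theorem cig_main (n : Nat) (l : List Char) (hn : l.length ≤ n)
    (last : String) (index : Int) (gaps start : List Int)
    (hlast : last = "-" → ∀ c, l.head? = some c → c ≠ '-') :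
    (l.foldl cigStepA (last, index, gaps, start)).2
      = (cigRuns l).foldl cigStepB (index, gaps, start) := by
  induction n generalizing l last index gaps start with
  | zero =>
    have : l = [] := List.eq_nil_of_length_eq_zero (Nat.le_zero.mp hn)
    subst this; simp [cigRuns]
  | succ n ih =>
    match l with
    | [] => simp [cigRuns]
    | c :: cs =>
      by_cases hb : c = '-'
      · -- gap run
        subst hb
        have hlast' : last ≠ "-" := by
          intro h
          exact hlast h '-' rfl rfl
        set p : Char → Bool := fun d => (d == '-') == true with hp
        have hsplit : cs = cs.takeWhile p ++ cs.dropWhile p := (List.takeWhile_append_dropWhile).symm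
        have htake : ∀ d ∈ cs.takeWhile p, d = '-' := by
          intro d hd
          have := List.mem_takeWhile_imp hd
          simpa [hp] using this
        have hdrop : ∀ d, (cs.dropWhile p).head? = some d → d ≠ '-' := by
          intro d hd h
          have := List.head?_dropWhile_not p cs
          rw [hd] at this
          simp [hp, h] at this
        have hlen : (cs.dropWhile p).length ≤ n := by
          have h1 := List.length_dropWhile_le p cs
          have h2 : cs.length ≤ n := by simpa using Nat.succ_le_succ_iff.mp hn
          omega
        -- unfold one run of cigRuns
        rw [cigRuns]
        simp only [beq_self_eq_true]
        have hstep : cigStepA (last, index, gaps, start) '-'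
            = ("-", index + 1, gaps ++ [1], start ++ [index + 1]) := by
          simp only [cigStepA, beq_self_eq_true, if_true, ne_eq, hlast', not_false_eq_true,
            if_true]
          rw [show String.singleton '-' = "-" by decide]
        conv_lhs => rw [hsplit, List.foldl_cons, hstep, List.foldl_append,
          cig_gap_cont (cs.takeWhile p) htake,
          ih (cs.dropWhile p) hlen "-" _ _ _ (fun _ => hdrop)]
        conv_rhs => rw [List.foldl_cons]
        congr 1
        simp only [cigStepB, if_pos]
        rw [← hp]
        have e1 : index + 1 + ((cs.takeWhile p).length : Int)
            = index + (((cs.takeWhile p).length + 1 : Nat) : Int) := by push_cast; ring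
        have e2 : (1 : Int) + ((cs.takeWhile p).length : Int)
            = (((cs.takeWhile p).length + 1 : Nat) : Int) := by push_cast; ring
        rw [e1, e2]
      · -- non-gap run
        set p : Char → Bool := fun d => (d == '-') == false with hp
        have hsplit : cs = cs.takeWhile p ++ cs.dropWhile p := (List.takeWhile_append_dropWhile).symm
        have htake : ∀ d ∈ cs.takeWhile p, d ≠ '-' := by
          intro d hd
          have := List.mem_takeWhile_imp hd
          simpa [hp] using this
        have hdrop : ∀ d, (cs.dropWhile p).head? = some d → d = '-' := by
          intro d hd
          have := List.head?_dropWhile_not p cs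
          rw [hd] at this
          simpa [hp] using this
        have hlen : (cs.dropWhile p).length ≤ n := by
          have h1 := List.length_dropWhile_le p cs
          have h2 : cs.length ≤ n := by simpa using Nat.succ_le_succ_iff.mp hn
          omega
        have hbeq : (c == '-') = false := by simpa using hb
        rw [cigRuns]
        simp only [hbeq]
        have hstep : cigStepA (last, index, gaps, start) c
            = (String.singleton c, index + 1, gaps, start) := by
          simp [cigStepA, hbeq]
        have hsing : String.singleton c ≠ "-" := by
          intro h
          exact hb (by simpa using congrArg String.toList h)
        obtain ⟨last', h1, h2⟩ := cig_nongap_cont (cs.takeWhile p) htake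
          (String.singleton c) hsing (index + 1) gaps start
        conv_lhs => rw [hsplit, List.foldl_cons, hstep, List.foldl_append, h2,
          ih (cs.dropWhile p) hlen last' _ _ _ (fun hl' => absurd hl' h1)]
        conv_rhs => rw [List.foldl_cons]
        congr 1
        simp only [cigStepB]
        rw [← hp]
        have e1 : index + 1 + ((cs.takeWhile p).length : Int)
            = index + (((cs.takeWhile p).length + 1 : Nat) : Int) := by push_cast; ring
        rw [e1, if_neg (by simp)]

-- ===== VERDICT (by name: the statement is the Claim_ definition above) =====
theorem count_individual_gaps_spec : Claim_equal_count_individual_gaps := by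
  intro sequence _
  unfold Spec_count_individual_gaps count_individual_gaps count_individual_gaps_alt
  have h := cig_main sequence.toList.length sequence.toList le_rfl "" 0 [] []
    (by intro hh; exact absurd hh (by decide))
  show ((sequence.toList.foldl cigStepA ("", 0, [], [])).2.2.1,
        (sequence.toList.foldl cigStepA ("", 0, [], [])).2.2.2)
      = (((cigRuns sequence.toList).foldl cigStepB (0, [], [])).2.1,
         ((cigRuns sequence.toList).foldl cigStepB (0, [], [])).2.2)
  rw [show (sequence.toList.foldl cigStepA ("", 0, [], [])).2.2.1
        = ((sequence.toList.foldl cigStepA ("", 0, [], [])).2).2.1 from rfl,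
     show (sequence.toList.foldl cigStepA ("", 0, [], [])).2.2.2
        = ((sequence.toList.foldl cigStepA ("", 0, [], [])).2).2.2 from rfl, h]
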